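-- pv_equiv track=rewrite | github.com/blurstudio/Simplex | SimplexUI/trees.py | getNextName
-- ===== SOURCE A (Python) =====
-- def getNextName(name, currentNames):
-- 	''' Get the next available name '''
-- 	i = 0
-- 	s = set(currentNames)
-- 	while True:
-- 		if not i:
-- 			nn = name
-- 		else:
-- 			nn = name + str(i)
-- 		if nn not in s:
-- 			return nn
-- 		i += 1
-- ===== SOURCE B (Python) =====
-- def _suffixIndex(name, n):
-- 	'''If n is `name` return 0; if n is name + str(i) for a canonical positive
-- 	integer i (digits only, no leading zero) return i; otherwise None.'''
-- 	if n == name: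
-- 		return 0
-- 	if n.startswith(name):
-- 		rem = n[len(name):]
-- 		if rem.startswith('0'):
-- 			return None
-- 		v = 0
-- 		for ch in rem:
-- 			if not ('0' <= ch <= '9'):
-- 				return None
-- 			v = 10 * v + (ord(ch) - 48)
-- 		return v
-- 	return None
--
--
-- def getNextName(name, currentNames):
-- 	''' Get the next available name '''
-- 	taken = set()
-- 	for n in currentNames:
-- 		i = _suffixIndex(name, n)
-- 		if i is not None:
-- 			taken.add(i)
-- 	for i in range(len(currentNames) + 1):
-- 		if i not in taken:
-- 			return name if i == 0 else name + str(i)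
-- ===== Notes on version B (the rewrite author's own statement) =====
-- stated objective: alternative
-- what changed: Instead of constructing candidate strings and probing the name set repeatedly, B makes one pass over currentNames parsing each name's numeric suffix into a set of taken integer indices, then scans the integers 0..len(currentNames) for the first free index and builds the result string once.
import Mathlib
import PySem

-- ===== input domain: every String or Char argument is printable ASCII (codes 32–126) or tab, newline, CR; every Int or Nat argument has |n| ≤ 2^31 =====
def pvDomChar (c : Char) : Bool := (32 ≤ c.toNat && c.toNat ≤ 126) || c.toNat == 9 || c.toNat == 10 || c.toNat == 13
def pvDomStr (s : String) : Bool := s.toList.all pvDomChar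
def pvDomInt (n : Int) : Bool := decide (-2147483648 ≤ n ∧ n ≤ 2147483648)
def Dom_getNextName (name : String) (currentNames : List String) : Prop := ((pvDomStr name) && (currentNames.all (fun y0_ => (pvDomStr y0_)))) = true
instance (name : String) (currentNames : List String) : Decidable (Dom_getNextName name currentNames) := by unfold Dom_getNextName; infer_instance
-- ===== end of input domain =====

-- B replaces A's construct-a-candidate-and-probe loop by one parsing pass that collects the
-- taken numeric suffix indices and then scans the integers for the first free one (objective:
-- alternative decomposition, same exact return value).

-- ===== PORT A =====
-- A's `while True` loop as fuel recursion; fuel `currentNames.length + 1` always suffices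
-- (proved below: one of the candidates for i = 0 .. len(currentNames) is unused), so the
-- fuel-0 default "" is never returned.
def getNextNameLoopA (name : String) (s : PySem.Set String) : Nat → Int → String
  | 0, _ => ""
  | fuel + 1, i =>
    let nn := if i == 0 then name else name ++ PySem.Int.toStr i
    if PySem.Set.contains s nn then getNextNameLoopA name s fuel (i + 1) else nn

def getNextName (name : String) (currentNames : List String) : String :=
  getNextNameLoopA name (PySem.Set.ofList currentNames) (currentNames.length + 1) 0

-- ===== PORT B =====
-- `v = 0; for ch in rem: if not ('0' <= ch <= '9'): return None; v = 10*v + (ord(ch) - 48); return v`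
def suffixDigitsLoop (v : Int) : List Char → Option Int
  | [] => some v
  | c :: cs => if '0' ≤ c ∧ c ≤ '9' then suffixDigitsLoop (10 * v + ((c.toNat : Int) - 48)) cs else none

def suffixIndex (name n : String) : Option Int :=
  if n == name then some 0
  else if PySem.Str.startswith n name then
    (let rem := PySem.Str.slice n (some (PySem.Str.len name)) none
     if PySem.Str.startswith rem "0" then none
     else suffixDigitsLoop 0 rem.toList)
  else none

-- `for i in range(len(currentNames)+1): if i not in taken: return …`; the nil case is
-- unreachable (proved below: `taken` has at most `currentNames.length` elements).
def scanLoopB (name : String) (taken : PySem.Set Int) : List Int → String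
  | [] => ""
  | i :: rest =>
    if PySem.Set.contains taken i then scanLoopB name taken rest
    else if i == 0 then name else name ++ PySem.Int.toStr i

def getNextName_alt (name : String) (currentNames : List String) : String :=
  let taken : PySem.Set Int :=
    currentNames.foldl (fun s n =>
      match suffixIndex name n with
      | some i => PySem.Set.add s i
      | none => s) PySem.Set.empty
  scanLoopB name taken (PySem.List.pyRange 0 ((currentNames.length : Int) + 1))

-- ===== PRECONDITION & SPEC =====
def Spec_getNextName (name : String) (currentNames : List String) (out : String) : Prop := out = getNextName_alt name currentNames
instance (name : String) (currentNames : List String) (out : String) : Decidable (Spec_getNextName name currentNames out) := by unfold Spec_getNextName; infer_instance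

-- ===== CLAIM (what is proved, stated in full; the proofs are below) =====
def Claim_equal_getNextName : Prop := ∀ (name : String) (currentNames : List String), Dom_getNextName name currentNames → Spec_getNextName name currentNames (getNextName name currentNames)

-- ===== LEMMAS AND PROOFS =====

-- the candidate name for index i, as a function of a natural counter
def candN (name : String) (i : Nat) : String :=
  if i = 0 then name else name ++ PySem.Int.toStr (i : Int)

-- the canonical decimal digit string of n (what str(n) produces for n ≥ 0)
def natDigits (n : Nat) : List Char :=
  if n < 10 then [Nat.digitChar n] else natDigits (n / 10) ++ [Nat.digitChar (n % 10)]
decreasing_by omega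

-- the taken-index set B builds (definitionally the fold inside getNextName_alt)
def takenOf (name : String) (l : List String) : PySem.Set Int :=
  l.foldl (fun s n =>
    match suffixIndex name n with
    | some i => PySem.Set.add s i
    | none => s) PySem.Set.empty


lemma natDigits_small {n : Nat} (h : n < 10) : natDigits n = [Nat.digitChar n] := by
  rw [natDigits]; exact if_pos h

lemma natDigits_large {n : Nat} (h : ¬ n < 10) :
    natDigits n = natDigits (n / 10) ++ [Nat.digitChar (n % 10)] := by
  rw [natDigits]; exact if_neg h

lemma digitChar_toNat {d : Nat} (h : d < 10) : (Nat.digitChar d).toNat = 48 + d := by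
  interval_cases d <;> decide

lemma char_eq_of_toNat {a b : Char} (h : a.toNat = b.toNat) : a = b := by
  apply Char.ext; exact UInt32.toNat_inj.mp h

lemma digit_cond_iff {c : Char} : ('0' ≤ c ∧ c ≤ '9') ↔ (48 ≤ c.toNat ∧ c.toNat ≤ 57) := by
  constructor <;> intro ⟨h1, h2⟩ <;>
    exact ⟨by simpa [Char.le_def, UInt32.le_iff_toNat_le] using h1,
           by simpa [Char.le_def, UInt32.le_iff_toNat_le] using h2⟩

lemma digitChar_of_digit {c : Char} (h1 : 48 ≤ c.toNat) (h2 : c.toNat ≤ 57) :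
    Nat.digitChar (c.toNat - 48) = c := by
  apply char_eq_of_toNat
  rw [digitChar_toNat (by omega)]
  omega

lemma toDigitsCore_eq : ∀ (fuel n : Nat), n < fuel → ∀ (ds : List Char),
    Nat.toDigitsCore 10 fuel n ds = natDigits n ++ ds := by
  intro fuel
  induction fuel with
  | zero => intro n h; omega
  | succ f ih =>
    intro n h ds
    rw [Nat.toDigitsCore]
    by_cases h10 : n < 10
    · have : n / 10 = 0 := by omega
      rw [if_pos this, natDigits_small h10]
      have : n % 10 = n := by omega
      simp [this]
    · have hne : ¬ n / 10 = 0 := by omega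
      rw [if_neg hne]
      rw [ih (n / 10) (by omega), natDigits_large h10]
      simp

lemma toChars_pos {i : Int} (h : 0 < i) : PySem.Int.toChars i = natDigits i.toNat := by
  unfold PySem.Int.toChars
  rw [if_neg (by omega)]
  unfold Nat.toDigits
  rw [toDigitsCore_eq (i.toNat + 1) i.toNat (by omega)]
  simp

lemma natDigits_ne_nil (n : Nat) : natDigits n ≠ [] := by
  unfold natDigits
  split <;> simp

lemma natDigits_head (n : Nat) (h : 1 ≤ n) : ∀ c, (natDigits n).head? = some c → 49 ≤ c.toNat := by
  induction n using natDigits.induct with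
  | case1 n h10 =>
    intro c hc
    rw [natDigits_small h10] at hc
    simp at hc
    subst hc
    rw [digitChar_toNat h10]; omega
  | case2 n h10 ih =>
    intro c hc
    rw [natDigits_large h10] at hc
    rw [List.head?_append_of_ne_nil _ (natDigits_ne_nil _)] at hc
    exact ih (by omega) c hc

lemma suffixDigitsLoop_append (xs ys : List Char) : ∀ v,
    suffixDigitsLoop v (xs ++ ys) = (suffixDigitsLoop v xs).bind fun v' => suffixDigitsLoop v' ys := by
  induction xs with
  | nil => intro v; simp [suffixDigitsLoop]
  | cons c cs ih =>
    intro v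
    simp only [List.cons_append, suffixDigitsLoop]
    split
    · exact ih _
    · simp

lemma suffixDigitsLoop_natDigits (n : Nat) : ∀ v : Int,
    suffixDigitsLoop v (natDigits n) = some (v * 10 ^ (natDigits n).length + n) := by
  induction n using natDigits.induct with
  | case1 n h =>
    intro v
    rw [natDigits_small h]
    have hd : ('0' ≤ Nat.digitChar n ∧ Nat.digitChar n ≤ '9') := by
      rw [digit_cond_iff, digitChar_toNat h]; omega
    simp only [suffixDigitsLoop, if_pos hd, List.length_cons, List.length_nil]
    rw [digitChar_toNat h]
    congr 1
    push_cast
    ring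
  | case2 n h ih =>
    intro v
    rw [natDigits_large h]
    rw [suffixDigitsLoop_append, ih]
    have h10 : n % 10 < 10 := by omega
    have hd : ('0' ≤ Nat.digitChar (n % 10) ∧ Nat.digitChar (n % 10) ≤ '9') := by
      rw [digit_cond_iff, digitChar_toNat h10]; omega
    simp only [Option.bind_some, suffixDigitsLoop, if_pos hd, List.length_append,
      List.length_cons, List.length_nil]
    congr 1
    rw [digitChar_toNat h10]
    rw [pow_succ]
    have h48 : ((48 + n % 10 : Nat) : Int) - 48 = ((n % 10 : Nat) : Int) := by push_cast; ring
    rw [h48]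
    rw [show v * (10 ^ (natDigits (n / 10)).length * 10) = v * 10 ^ (natDigits (n / 10)).length * 10 from by ring]
    generalize v * 10 ^ (natDigits (n / 10)).length = A
    omega

lemma suffixDigitsLoop_digits : ∀ (cs : List Char) (v k : Int),
    suffixDigitsLoop v cs = some k → ∀ c ∈ cs, 48 ≤ c.toNat ∧ c.toNat ≤ 57 := by
  intro cs
  induction cs with
  | nil => intro v k _ c hc; simp at hc
  | cons c' cs ih =>
    intro v k h c hc
    simp only [suffixDigitsLoop] at h
    split at h
    · rcases List.mem_cons.mp hc with h' | h'
      · subst h'; exact digit_cond_iff.mp (by assumption)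
      · exact ih _ _ h c h'
    · simp at h

lemma suffixDigitsLoop_canon : ∀ (cs : List Char), cs ≠ [] →
    (∀ c ∈ cs, 48 ≤ c.toNat ∧ c.toNat ≤ 57) → cs.head? ≠ some '0' →
    ∀ k : Int, suffixDigitsLoop 0 cs = some k → 1 ≤ k ∧ cs = natDigits k.toNat := by
  intro cs
  induction cs using List.reverseRecOn with
  | nil => intro h; exact absurd rfl h
  | append_singleton ds c ih =>
    intro _ hdig hhead k hk
    rw [suffixDigitsLoop_append] at hk
    have hc : 48 ≤ c.toNat ∧ c.toNat ≤ 57 := hdig c (by simp)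
    rcases hds : suffixDigitsLoop 0 ds with _ | v
    · rw [hds] at hk; simp at hk
    · rw [hds] at hk
      simp only [Option.bind_some, suffixDigitsLoop] at hk
      rw [if_pos (digit_cond_iff.mpr hc)] at hk
      rw [Option.some.injEq] at hk
      rcases List.eq_nil_or_concat ds with hnil | _
      · subst hnil
        simp only [suffixDigitsLoop, Option.some.injEq] at hds
        subst hds
        simp only [List.nil_append, List.head?_cons, ne_eq, Option.some.injEq] at hhead
        have hc0 : c.toNat ≠ 48 := fun h => hhead (char_eq_of_toNat (h.trans (by decide)))
        have hk1 : 1 ≤ k := by omega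
        refine ⟨hk1, ?_⟩
        have hlt : k.toNat < 10 := by omega
        rw [natDigits_small hlt]
        have : k.toNat = c.toNat - 48 := by omega
        rw [this, digitChar_of_digit hc.1 hc.2]
        simp
      · have hne : ds ≠ [] := by rename_i h'; rcases h' with ⟨_, _, rfl⟩; simp
        have hhead' : ds.head? ≠ some '0' := by
          rwa [List.head?_append_of_ne_nil _ hne] at hhead
        obtain ⟨hv1, hdsEq⟩ := ih hne (fun c' hc' => hdig c' (by simp [hc'])) hhead' v hds
        have hk1 : 1 ≤ k := by omega
        refine ⟨hk1, ?_⟩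
        have h10 : ¬ k.toNat < 10 := by omega
        rw [natDigits_large h10]
        have hdiv : k.toNat / 10 = v.toNat := by omega
        have hmod : k.toNat % 10 = c.toNat - 48 := by omega
        rw [hdiv, hmod, digitChar_of_digit hc.1 hc.2, ← hdsEq]

-- characterisation of B's per-name parser
lemma suffixIndex_some (name n : String) (k : Int) :
    suffixIndex name n = some k ↔
      (k = 0 ∧ n = name) ∨ (1 ≤ k ∧ n.toList = name.toList ++ natDigits k.toNat) := by
  constructor
  · intro h
    unfold suffixIndex at h
    split at h
    · left
      rename_i heq
      exact ⟨by simpa using h.symm, by simpa [beq_iff_eq] using heq⟩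
    · split at h
      · rename_i hne hpre
        rw [PySem.Str.startswith_eq] at hpre
        have hpre' : name.toList <+: n.toList := (PySem.Chars.startswith_iff _ _).mp hpre
        simp only at h
        split at h
        · simp at h
        · rename_i hz
          set rem := PySem.Str.slice n (some (PySem.Str.len name)) none with hrem
          have hremL : rem.toList = n.toList.drop name.toList.length := by
            rw [hrem, PySem.Str.toList_slice, PySem.Chars.slice_eq_listSlice, PySem.Str.len_eq,
              PySem.List.slice_from _ (by positivity), Int.toNat_natCast]
          obtain ⟨t, ht⟩ := hpre'
          have htL : rem.toList = t := by rw [hremL, ← ht]; simp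
          have hnn : ¬ n = name := by simpa [beq_iff_eq] using hne
          have htne : t ≠ [] := by
            intro hnil
            subst hnil
            simp at ht
            exact hnn (String.toList_inj.mp ht.symm)
          have hdig := suffixDigitsLoop_digits rem.toList 0 k h
          have hhead : rem.toList.head? ≠ some '0' := by
            intro hh
            apply hz
            rw [PySem.Str.startswith_eq, PySem.Chars.startswith_iff]
            obtain ⟨t, ht0⟩ := List.head?_eq_some_iff.mp hh
            rw [ht0]
            exact ⟨t, by simp⟩
          obtain ⟨hk1, hkEq⟩ := suffixDigitsLoop_canon rem.toList (by rw [htL]; exact htne)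
            hdig hhead k h
          right
          exact ⟨hk1, by rw [← ht, ← htL, hkEq]⟩
      · simp at h
  · intro h
    rcases h with ⟨hk, hn⟩ | ⟨hk, hn⟩
    · subst hk hn
      unfold suffixIndex
      simp
    · have hnn : n ≠ name := by
        intro h'
        subst h'
        have hlen := congrArg List.length hn
        rw [List.length_append] at hlen
        exact natDigits_ne_nil k.toNat (List.eq_nil_of_length_eq_zero (by omega))
      unfold suffixIndex
      rw [if_neg (by simpa [beq_iff_eq] using hnn)]
      have hpre : PySem.Str.startswith n name = true := by
        rw [PySem.Str.startswith_eq, PySem.Chars.startswith_iff]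
        exact ⟨natDigits k.toNat, hn.symm⟩
      rw [if_pos hpre]
      simp only
      set rem := PySem.Str.slice n (some (PySem.Str.len name)) none with hrem
      have hremL : rem.toList = natDigits k.toNat := by
        rw [hrem, PySem.Str.toList_slice, PySem.Chars.slice_eq_listSlice, PySem.Str.len_eq,
          PySem.List.slice_from _ (by positivity), Int.toNat_natCast, hn]
        simp
      have hz : ¬ PySem.Str.startswith rem "0" = true := by
        rw [PySem.Str.startswith_eq, PySem.Chars.startswith_iff]
        intro hpre0
        have : rem.toList.head? = some '0' := by
          rcases hpre0 with ⟨t, ht⟩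
          rw [← ht]; rfl
        rw [hremL] at this
        have := natDigits_head k.toNat (by omega) '0' this
        simp at this
      rw [if_neg hz, hremL, suffixDigitsLoop_natDigits]
      have hkk : (0 : Int) * 10 ^ (natDigits k.toNat).length + (k.toNat : Int) = k := by
        rw [zero_mul, zero_add]; omega
      rw [hkk]

lemma suffixIndex_cand (name n : String) (j : Nat) :
    suffixIndex name n = some (j : Int) ↔ n = candN name j := by
  rw [suffixIndex_some]
  unfold candN
  rcases Nat.eq_zero_or_pos j with hj | hj
  · subst hj
    constructor
    · rintro (⟨_, h⟩ | ⟨h1, _⟩)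
      · simpa using h
      · omega
    · intro h
      exact Or.inl ⟨by simp, by simpa using h⟩
  · have hT : PySem.Int.toChars ((j : Nat) : Int) = natDigits j := by
      rw [toChars_pos (by exact_mod_cast hj)]
      simp
    rw [if_neg (by omega)]
    constructor
    · rintro (⟨h, _⟩ | ⟨h1, h2⟩)
      · omega
      · apply String.toList_inj.mp
        rw [String.toList_append, PySem.Int.toList_toStr, hT, h2]
        simp
    · intro h
      right
      refine ⟨by exact_mod_cast hj, ?_⟩
      rw [h, String.toList_append, PySem.Int.toList_toStr, hT]
      simp

lemma mem_takenFold (name : String) : ∀ (l : List String) (acc : PySem.Set Int) (j : Int),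
    j ∈ l.foldl (fun s n =>
      match suffixIndex name n with
      | some i => PySem.Set.add s i
      | none => s) acc ↔ j ∈ acc ∨ ∃ n ∈ l, suffixIndex name n = some j := by
  intro l
  induction l with
  | nil => intro acc j; simp
  | cons x xs ih =>
    intro acc j
    simp only [List.foldl_cons]
    rw [ih]
    rcases hx : suffixIndex name x with _ | i
    · simp only [List.mem_cons]
      constructor
      · rintro (h | ⟨n, hn, h⟩)
        · exact Or.inl h
        · exact Or.inr ⟨n, Or.inr hn, h⟩
      · rintro (h | ⟨n, (rfl | hn), h⟩)
        · exact Or.inl h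
        · rw [hx] at h; simp at h
        · exact Or.inr ⟨n, hn, h⟩
    · rw [PySem.Set.mem_add]
      constructor
      · rintro ((h | rfl) | ⟨n, hn, h⟩)
        · exact Or.inl h
        · exact Or.inr ⟨x, List.mem_cons_self, hx⟩
        · exact Or.inr ⟨n, List.mem_cons_of_mem _ hn, h⟩
      · rintro (h | ⟨n, hn, h⟩)
        · exact Or.inl (Or.inl h)
        · rcases List.mem_cons.mp hn with rfl | hn'
          · rw [hx] at h
            exact Or.inl (Or.inr (by simpa using h.symm))
          · exact Or.inr ⟨n, hn', h⟩

lemma mem_takenOf (name : String) (l : List String) (j : Int) :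
    j ∈ takenOf name l ↔ ∃ n ∈ l, suffixIndex name n = some j := by
  unfold takenOf
  rw [mem_takenFold]
  simp [PySem.Set.empty]

lemma mem_takenOf_cand (name : String) (l : List String) (j : Nat) :
    (j : Int) ∈ takenOf name l ↔ candN name j ∈ l := by
  rw [mem_takenOf]
  constructor
  · rintro ⟨n, hn, h⟩
    rw [suffixIndex_cand] at h
    subst h
    exact hn
  · intro h
    exact ⟨candN name j, h, (suffixIndex_cand name _ j).mpr rfl⟩

lemma length_takenFold (name : String) : ∀ (l : List String) (acc : PySem.Set Int),
    (l.foldl (fun s n =>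
      match suffixIndex name n with
      | some i => PySem.Set.add s i
      | none => s) acc).length ≤ acc.length + l.length := by
  intro l
  induction l with
  | nil => intro acc; simp
  | cons x xs ih =>
    intro acc
    simp only [List.foldl_cons, List.length_cons]
    refine le_trans (ih _) ?_
    have : (match suffixIndex name x with
      | some i => PySem.Set.add acc i
      | none => acc).length ≤ acc.length + 1 := by
      split
      · unfold PySem.Set.add
        split
        · simp
        · simp
      · simp
    omega

lemma length_takenOf (name : String) (l : List String) :
    (takenOf name l).length ≤ l.length := by
  have := length_takenFold name l PySem.Set.empty
  simpa [PySem.Set.empty] using this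

lemma exists_free (name : String) (l : List String) :
    ∃ j : Nat, j ≤ l.length ∧ candN name j ∉ l := by
  by_contra h
  push Not at h
  have hsub : ((List.range (l.length + 1)).map (fun m : Nat => (m : Int))) ⊆ takenOf name l := by
    intro x hx
    simp only [List.mem_map, List.mem_range] at hx
    obtain ⟨m, hm, rfl⟩ := hx
    exact (mem_takenOf_cand name l m).mpr (h m (by omega))
  have hnd : ((List.range (l.length + 1)).map (fun m : Nat => (m : Int))).Nodup :=
    (List.nodup_range).map (fun a b hab => by exact_mod_cast hab)
  have := (List.subperm_of_subset hnd hsub).length_le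
  simp at this
  have := length_takenOf name l
  omega

-- A's loop returns the first free candidate
lemma loopA_eq (name : String) (l : List String)
    (hex : ∃ m : Nat, candN name m ∉ l) :
    ∀ (fuel j : Nat), j ≤ Nat.find hex → Nat.find hex < j + fuel →
      getNextNameLoopA name (PySem.Set.ofList l) fuel (j : Int) = candN name (Nat.find hex) := by
  intro fuel
  induction fuel with
  | zero => intro j h1 h2; omega
  | succ f ih =>
    intro j h1 h2
    have hnn : (if (j : Int) == 0 then name else name ++ PySem.Int.toStr (j : Int)) = candN name j := by
      unfold candN
      by_cases hj : j = 0
      · subst hj; simp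
      · rw [if_neg (by simpa using hj), if_neg hj]
    show (if PySem.Set.contains (PySem.Set.ofList l) _ then _ else _) = _
    rw [hnn]
    have hmem : PySem.Set.contains (PySem.Set.ofList l) (candN name j) = true ↔ candN name j ∈ l := by
      unfold PySem.Set.contains
      rw [List.contains_iff_mem, PySem.Set.mem_ofList]
    rcases Nat.lt_or_ge j (Nat.find hex) with hj | hj
    · have hin : candN name j ∈ l := by
        by_contra hout
        exact absurd (Nat.find_le hout : Nat.find hex ≤ j) (by omega)
      rw [if_pos (hmem.mpr hin)]
      have : (j : Int) + 1 = ((j + 1 : Nat) : Int) := by push_cast; ring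
      rw [this]
      exact ih (j + 1) (by omega) (by omega)
    · have hj' : j = Nat.find hex := by omega
      have hout : candN name j ∉ l := by rw [hj']; exact Nat.find_spec hex
      rw [if_neg (by simp [PySem.Set.contains, PySem.Set.mem_ofList, hout]), hj']

-- B's scan returns the first free candidate
lemma scanB_eq (name : String) (l : List String)
    (hex : ∃ m : Nat, candN name m ∉ l) :
    ∀ (cnt j : Nat), j ≤ Nat.find hex → Nat.find hex < j + cnt →
      scanLoopB name (takenOf name l) ((List.range' j cnt).map (fun m : Nat => (m : Int))) =
        candN name (Nat.find hex) := by
  intro cnt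
  induction cnt with
  | zero => intro j h1 h2; omega
  | succ c ih =>
    intro j h1 h2
    rw [List.range'_succ, List.map_cons]
    have hnn : (if (j : Int) == 0 then name else name ++ PySem.Int.toStr (j : Int)) = candN name j := by
      unfold candN
      by_cases hj : j = 0
      · subst hj; simp
      · rw [if_neg (by simpa using hj), if_neg hj]
    show (if PySem.Set.contains (takenOf name l) (j : Int) then _ else _) = _
    have hmem : PySem.Set.contains (takenOf name l) (j : Int) = true ↔ candN name j ∈ l := by
      unfold PySem.Set.contains
      rw [List.contains_iff_mem, mem_takenOf_cand]
    rcases Nat.lt_or_ge j (Nat.find hex) with hj | hj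
    · have hin : candN name j ∈ l := by
        by_contra hout
        exact absurd (Nat.find_le hout : Nat.find hex ≤ j) (by omega)
      rw [if_pos (hmem.mpr hin)]
      exact ih (j + 1) (by omega) (by omega)
    · have hj' : j = Nat.find hex := by omega
      have hout : candN name j ∉ l := by rw [hj']; exact Nat.find_spec hex
      rw [if_neg (by simp [PySem.Set.contains, mem_takenOf_cand, hout]), hnn, hj']

lemma both_eq (name : String) (l : List String) :
    getNextName name l = getNextName_alt name l := by
  obtain ⟨j0, hj0, hfree⟩ := exists_free name l
  have hex : ∃ m : Nat, candN name m ∉ l := ⟨j0, hfree⟩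
  have hN : Nat.find hex ≤ l.length := le_trans (Nat.find_min' hex hfree) hj0
  have hA : getNextName name l = candN name (Nat.find hex) := by
    show getNextNameLoopA name (PySem.Set.ofList l) (l.length + 1) ((0 : Nat) : Int) = _
    exact loopA_eq name l hex (l.length + 1) 0 (by omega) (by omega)
  have hB : getNextName_alt name l = candN name (Nat.find hex) := by
    show scanLoopB name (takenOf name l) (PySem.List.pyRange 0 ((l.length : Int) + 1)) = _
    have hcast : ((l.length : Int) + 1) = ((l.length + 1 : Nat) : Int) := by push_cast; ring
    rw [hcast, PySem.List.pyRange_zero_natCast, List.range_eq_range']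
    exact scanB_eq name l hex (l.length + 1) 0 (by omega) (by omega)
  rw [hA, hB]

-- ===== VERDICT (by name: the statement is the Claim_ definition above) =====
theorem getNextName_spec : Claim_equal_getNextName := by
  intro name currentNames _
  unfold Spec_getNextName
  exact both_eq name currentNames
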